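-- pv_equiv track=rewrite | github.com/sprtxuuu/MPTN_resilience_publication | toolbox.py | divide_sequential_edge_list
-- ===== SOURCE A (Python) =====
-- def divide_sequential_edge_list(edge_list):
--     if len(edge_list) == 1:
--         sections = [edge_list]
--     elif len(edge_list) > 1:
--         sections = []
--         section = [edge_list[0]]
--         for i in range(1, len(edge_list)):
--             if edge_list[i][0] == edge_list[i - 1][1]:
--                 section.append(edge_list[i])
--             else:
--                 sections.append(section)
--                 section = [edge_list[i]]
--         sections.append(section)
--     else:
--         sections = None
--     return sections
-- ===== SOURCE B (Python) =====
-- def divide_sequential_edge_list(edge_list):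
--     # Build the chains back-to-front: scan the edges in reverse, keeping the
--     # groups (and the edges inside each group) in reverse order, then flip both.
--     groups = []
--     for e in reversed(edge_list):
--         if groups and e[1] == groups[-1][-1][0]:
--             groups[-1].append(e)
--         else:
--             groups.append([e])
--     if not groups:
--         return None
--     return [g[::-1] for g in reversed(groups)]
-- ===== Notes on version B (the rewrite author's own statement) =====
-- stated objective: alternative
-- what changed: B builds the chains back-to-front in one reversed pass (groups and their edges kept in reverse order and flipped at the end) instead of A's forward loop with a pending-section accumulator flushed at cut points.
import Mathlib
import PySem

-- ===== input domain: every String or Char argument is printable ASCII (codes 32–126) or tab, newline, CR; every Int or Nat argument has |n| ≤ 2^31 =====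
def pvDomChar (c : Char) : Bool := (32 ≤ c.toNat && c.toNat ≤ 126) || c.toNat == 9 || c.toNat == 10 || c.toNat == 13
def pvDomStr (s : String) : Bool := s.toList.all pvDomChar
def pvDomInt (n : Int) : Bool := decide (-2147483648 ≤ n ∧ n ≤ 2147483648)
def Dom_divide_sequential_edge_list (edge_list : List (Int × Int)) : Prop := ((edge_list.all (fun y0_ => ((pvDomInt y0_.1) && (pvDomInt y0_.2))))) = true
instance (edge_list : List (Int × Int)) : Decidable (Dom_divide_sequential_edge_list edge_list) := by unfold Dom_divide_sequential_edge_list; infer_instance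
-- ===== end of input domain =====

-- B builds the chains back-to-front in one reversed pass (groups kept reversed, flipped at the end)
-- instead of A's forward loop with a pending-section accumulator; same cost, different decomposition.


-- ===== PORT A =====
-- A's for-loop over i in range(1, len): state (sections, section), with edge_list[i-1]
-- carried along as `prev` (it is exactly the element of the previous iteration).
def dslLoop (sections : List (List (Int × Int))) (sec : List (Int × Int)) (prev : Int × Int) :
    List (Int × Int) → List (List (Int × Int)) × List (Int × Int)
  | [] => (sections, sec)
  | e :: rest =>
    if e.1 = prev.2 then dslLoop sections (sec ++ [e]) e rest
    else dslLoop (sections ++ [sec]) [e] e rest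

def divide_sequential_edge_list (edge_list : List (Int × Int)) : Option (List (List (Int × Int))) :=
  match edge_list with
  | [] => none                                   -- else: sections = None
  | [x] => some [[x]]                            -- len == 1: sections = [edge_list]
  | x :: rest =>                                 -- len > 1: the loop, then sections.append(section)
    let r := dslLoop [] [x] x rest
    some (r.1 ++ [r.2])

-- ===== PORT B =====
-- one iteration of B's reversed loop body (groups[-1][-1] inspected, append at the end)
def altStep (groups : List (List (Int × Int))) (e : Int × Int) : List (List (Int × Int)) :=
  match groups.getLast? with
  | none => groups ++ [[e]]
  | some g =>
    match g.getLast? with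
    | none => groups ++ [[e]]                    -- unreachable: groups never holds an empty group
    | some h => if e.2 = h.1 then groups.dropLast ++ [g ++ [e]] else groups ++ [[e]]

def divide_sequential_edge_list_alt (edge_list : List (Int × Int)) : Option (List (List (Int × Int))) :=
  let groups := edge_list.reverse.foldl altStep []   -- for e in reversed(edge_list): ...
  if groups.isEmpty then none
  else some (groups.reverse.map List.reverse)        -- [g[::-1] for g in reversed(groups)]

-- ===== PRECONDITION & SPEC =====
def Spec_divide_sequential_edge_list (edge_list : List (Int × Int)) (out : Option (List (List (Int × Int)))) : Prop := out = divide_sequential_edge_list_alt edge_list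
instance (edge_list : List (Int × Int)) (out : Option (List (List (Int × Int)))) : Decidable (Spec_divide_sequential_edge_list edge_list out) := by unfold Spec_divide_sequential_edge_list; infer_instance

-- ===== CLAIM (what is proved, stated in full; the proofs are below) =====
def Claim_equal_divide_sequential_edge_list : Prop := ∀ (edge_list : List (Int × Int)), Dom_divide_sequential_edge_list edge_list → Spec_divide_sequential_edge_list edge_list (divide_sequential_edge_list edge_list)

-- ===== LEMMAS AND PROOFS =====

-- reference chaining function: a plain foldr both ports are reduced to
def chainStep (e : Int × Int) (gs : List (List (Int × Int))) : List (List (Int × Int)) :=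
  match gs with
  | (h :: t) :: gs' => if h.1 = e.2 then (e :: h :: t) :: gs' else [e] :: (h :: t) :: gs'
  | [] :: gs' => [e] :: [] :: gs'                -- unreachable for `chains`
  | [] => [[e]]

def chains (el : List (Int × Int)) : List (List (Int × Int)) := el.foldr chainStep []

theorem chains_shape (x : Int × Int) (xs : List (Int × Int)) :
    ∃ t gs, chains (x :: xs) = (x :: t) :: gs := by
  induction xs generalizing x with
  | nil => exact ⟨[], [], rfl⟩
  | cons y ys ih =>
    obtain ⟨t, gs, h⟩ := ih y
    simp only [chains, List.foldr] at h ⊢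
    rw [h]
    simp only [chainStep]
    split_ifs
    · exact ⟨y :: t, gs, rfl⟩
    · exact ⟨[], (y :: t) :: gs, rfl⟩

-- A's loop, characterised against `chains`
theorem dslLoop_chains (rest : List (Int × Int)) :
    ∀ (sec : List (Int × Int)) (p : Int × Int) (sections : List (List (Int × Int))),
      (dslLoop sections (sec ++ [p]) p rest).1 ++ [(dslLoop sections (sec ++ [p]) p rest).2] =
        sections ++ (match chains (p :: rest) with
                     | g :: gs => (sec ++ g) :: gs
                     | [] => [sec]) := by
  induction rest with
  | nil => intro sec p sections; simp [dslLoop, chains, chainStep]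
  | cons e rest' ih =>
    intro sec p sections
    obtain ⟨t, gs, hsh⟩ := chains_shape e rest'
    have hstep : chains (p :: e :: rest') = chainStep p (chains (e :: rest')) := rfl
    by_cases hc : e.1 = p.2
    · have h1 : dslLoop sections (sec ++ [p]) p (e :: rest')
          = dslLoop sections ((sec ++ [p]) ++ [e]) e rest' := by
        simp [dslLoop, hc]
      rw [h1, ih (sec ++ [p]) e sections, hstep, hsh]
      simp [chainStep, hc]
    · have h1 : dslLoop sections (sec ++ [p]) p (e :: rest')
          = dslLoop (sections ++ [sec ++ [p]]) ([] ++ [e]) e rest' := by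
        simp [dslLoop, hc]
      rw [h1, ih [] e (sections ++ [sec ++ [p]]), hstep, hsh]
      simp [chainStep, hc]

theorem portA_eq_chains (x : Int × Int) (rest : List (Int × Int)) :
    divide_sequential_edge_list (x :: rest) = some (chains (x :: rest)) := by
  cases rest with
  | nil => simp [divide_sequential_edge_list, chains, chainStep]
  | cons y ys =>
    have h := dslLoop_chains (y :: ys) [] x []
    obtain ⟨t, gs, hsh⟩ := chains_shape x (y :: ys)
    simp only [List.nil_append] at h
    simp only [divide_sequential_edge_list]
    rw [h, hsh]

-- B's reversed accumulation, characterised against `chains`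
theorem foldr_altStep_eq (el : List (Int × Int)) :
    el.foldr (fun e gs => altStep gs e) [] = ((chains el).map List.reverse).reverse := by
  induction el with
  | nil => rfl
  | cons x xs ih =>
    simp only [List.foldr, ih]
    cases xs with
    | nil => simp [chains, chainStep, altStep]
    | cons y ys =>
      obtain ⟨t, gs, hsh⟩ := chains_shape y ys
      have hstep : chains (x :: y :: ys) = chainStep x (chains (y :: ys)) := rfl
      rw [hsh, hstep, hsh]
      simp only [chainStep, List.map_cons, List.reverse_cons, List.reverse_cons]
      by_cases hc : y.1 = x.2
      · simp [altStep, hc]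
      · have hc' : ¬ x.2 = y.1 := fun h => hc h.symm
        simp [altStep, hc', hc]

theorem portB_eq_chains (x : Int × Int) (rest : List (Int × Int)) :
    divide_sequential_edge_list_alt (x :: rest) = some (chains (x :: rest)) := by
  obtain ⟨t, gs, hsh⟩ := chains_shape x rest
  simp only [divide_sequential_edge_list_alt, List.foldl_reverse, foldr_altStep_eq, hsh]
  simp [List.map_map]

-- ===== VERDICT (by name: the statement is the Claim_ definition above) =====
theorem divide_sequential_edge_list_spec : Claim_equal_divide_sequential_edge_list := by
  intro el _
  unfold Spec_divide_sequential_edge_list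
  cases el with
  | nil => rfl
  | cons x rest => rw [portA_eq_chains, portB_eq_chains]
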